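-- pv_equiv track=rewrite | github.com/Joskia/Translate-Editor-Mods-Rimworld | Traductor customtikner.py | _restaurar_placeholders
-- ===== SOURCE A (Python) =====
-- def _restaurar_placeholders(texto_traducido, placeholders):
--     """Restaura los placeholders originales en el texto traducido"""
--     texto_con_placeholders = texto_traducido
--
--     replacements_inversos = {
--         'PRIMER_ELEMENTO': '{0}',
--         'SEGUNDO_ELEMENTO': '{1}',
--         'TERCER_ELEMENTO': '{2}',
--         'CUARTO_ELEMENTO': '{3}',
--         'NOMBRE': '{name}',
--         'PERSONAJE': '{pawn}',
--         'OBJETO': '{item}',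
--         'NUMERO': '{number}',
--         'CANTIDAD': '{amount}',
--         'GENERO': '{gender}',
--         'FACCIÓN': '{faction}',
--         'UBICACIÓN': '{location}',
--         'TIEMPO': '{time}',
--         'ELEMENTO': placeholders[0] if placeholders else '{}'
--     }
--
--     for temporal, original in replacements_inversos.items():
--         texto_con_placeholders = texto_con_placeholders.replace(temporal, original)
--
--     return texto_con_placeholders
-- ===== SOURCE B (Python) =====
-- def _restaurar_placeholders(texto_traducido, placeholders):
--     """Restaura los placeholders originales en el texto traducido.
--
--     Alternative algorithm: keeps the text as a list of segments, where text
--     inserted by a replacement becomes a 'dead' segment that later passes can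
--     never rescan or split; the result string is built once at the end."""
--     pairs = [
--         ('PRIMER_ELEMENTO', '{0}'),
--         ('SEGUNDO_ELEMENTO', '{1}'),
--         ('TERCER_ELEMENTO', '{2}'),
--         ('CUARTO_ELEMENTO', '{3}'),
--         ('NOMBRE', '{name}'),
--         ('PERSONAJE', '{pawn}'),
--         ('OBJETO', '{item}'),
--         ('NUMERO', '{number}'),
--         ('CANTIDAD', '{amount}'),
--         ('GENERO', '{gender}'),
--         ('FACCIÓN', '{faction}'),
--         ('UBICACIÓN', '{location}'),
--         ('TIEMPO', '{time}'),
--         ('ELEMENTO', placeholders[0] if placeholders else '{}'),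
--     ]
--     segs = [(True, texto_traducido)]
--     for key, val in pairs:
--         new_segs = []
--         for live, s in segs:
--             if live:
--                 parts = s.split(key)
--                 new_segs.append((True, parts[0]))
--                 for p in parts[1:]:
--                     new_segs.append((False, val))
--                     new_segs.append((True, p))
--             else:
--                 new_segs.append((live, s))
--         segs = new_segs
--     return ''.join(s for _, s in segs)
-- ===== Notes on version B (the rewrite author's own statement) =====
-- stated objective: alternative
-- what changed: Instead of 14 sequential full-string replace passes that each rebuild and rescan the whole string (including previously inserted replacement text), B keeps the text as a list of live/dead segments: each pass splits only the still-live segments on its key, inserted replacement text becomes a dead segment that later passes can never rescan or split, and the result string is assembled once at the end.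
import Mathlib
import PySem

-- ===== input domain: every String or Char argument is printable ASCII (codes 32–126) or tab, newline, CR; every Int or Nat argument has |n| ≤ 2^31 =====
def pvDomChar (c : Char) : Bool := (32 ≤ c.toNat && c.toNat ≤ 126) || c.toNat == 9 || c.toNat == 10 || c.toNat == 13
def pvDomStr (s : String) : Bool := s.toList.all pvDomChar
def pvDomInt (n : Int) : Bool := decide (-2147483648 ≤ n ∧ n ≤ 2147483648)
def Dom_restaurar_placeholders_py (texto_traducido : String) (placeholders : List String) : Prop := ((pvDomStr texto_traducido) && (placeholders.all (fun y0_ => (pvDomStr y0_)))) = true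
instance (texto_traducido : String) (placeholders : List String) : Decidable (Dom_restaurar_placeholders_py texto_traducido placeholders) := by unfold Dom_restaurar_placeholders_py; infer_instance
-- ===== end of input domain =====

-- B keeps the text as live/dead segments so replacement text is never rescanned,
-- instead of A's 14 sequential whole-string replace passes (objective: alternative).

-- ===== PORT A =====
-- literal transliteration: build the inverse-replacement pair list (the dict's
-- items in insertion order), then fold str.replace over it
def restaurar_placeholders_py (texto_traducido : String) (placeholders : List String) : String :=
  let replacements_inversos : List (String × String) :=
    [("PRIMER_ELEMENTO", "{0}"),
     ("SEGUNDO_ELEMENTO", "{1}"),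
     ("TERCER_ELEMENTO", "{2}"),
     ("CUARTO_ELEMENTO", "{3}"),
     ("NOMBRE", "{name}"),
     ("PERSONAJE", "{pawn}"),
     ("OBJETO", "{item}"),
     ("NUMERO", "{number}"),
     ("CANTIDAD", "{amount}"),
     ("GENERO", "{gender}"),
     ("FACCIÓN", "{faction}"),
     ("UBICACIÓN", "{location}"),
     ("TIEMPO", "{time}"),
     ("ELEMENTO", match placeholders with | [] => "{}" | p :: _ => p)]
  List.foldl (fun t kv => PySem.Str.replace t kv.1 kv.2) texto_traducido replacements_inversos

-- ===== PORT B =====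
-- B-side helpers: a live segment's split parts interleaved with dead copies of the value
def pvInterleave (v : List Char) (parts : List (List Char)) : List (Bool × List Char) :=
  match parts with
  | [] => []
  | p :: rest => (true, p) :: rest.flatMap (fun q => [(false, v), (true, q)])

def pvSegStep (k v : List Char) (segs : List (Bool × List Char)) : List (Bool × List Char) :=
  segs.flatMap (fun s => if s.1 then pvInterleave v (PySem.Chars.splitOn s.2 k) else [s])

def restaurar_placeholders_py_alt (texto_traducido : String) (placeholders : List String) : String :=
  let pairs : List (List Char × List Char) :=
    [("PRIMER_ELEMENTO".toList, "{0}".toList),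
     ("SEGUNDO_ELEMENTO".toList, "{1}".toList),
     ("TERCER_ELEMENTO".toList, "{2}".toList),
     ("CUARTO_ELEMENTO".toList, "{3}".toList),
     ("NOMBRE".toList, "{name}".toList),
     ("PERSONAJE".toList, "{pawn}".toList),
     ("OBJETO".toList, "{item}".toList),
     ("NUMERO".toList, "{number}".toList),
     ("CANTIDAD".toList, "{amount}".toList),
     ("GENERO".toList, "{gender}".toList),
     ("FACCIÓN".toList, "{faction}".toList),
     ("UBICACIÓN".toList, "{location}".toList),
     ("TIEMPO".toList, "{time}".toList),
     ("ELEMENTO".toList, (match placeholders with | [] => "{}" | p :: _ => p).toList)]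
  let segs := List.foldl (fun sg p => pvSegStep p.1 p.2 sg) [(true, texto_traducido.toList)] pairs
  String.ofList (segs.flatMap (fun s => s.2))

-- ===== PRECONDITION & SPEC =====
def Spec_restaurar_placeholders_py (texto_traducido : String) (placeholders : List String) (out : String) : Prop := out = restaurar_placeholders_py_alt texto_traducido placeholders
instance (texto_traducido : String) (placeholders : List String) (out : String) : Decidable (Spec_restaurar_placeholders_py texto_traducido placeholders out) := by unfold Spec_restaurar_placeholders_py; infer_instance

-- ===== CLAIM (what is proved, stated in full; the proofs are below) =====
def Claim_equal_restaurar_placeholders_py : Prop := ∀ (texto_traducido : String) (placeholders : List String), Dom_restaurar_placeholders_py texto_traducido placeholders → Spec_restaurar_placeholders_py texto_traducido placeholders (restaurar_placeholders_py texto_traducido placeholders)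

-- ===== LEMMAS AND PROOFS =====

-- fuel-free specification of Python's str.replace scan (k nonempty)
def pvRep (k v : List Char) : List Char → List Char
  | [] => []
  | c :: t =>
    if h : k ≠ [] ∧ k.isPrefixOf (c :: t) then v ++ pvRep k v ((c :: t).drop k.length)
    else c :: pvRep k v t
termination_by l => l.length
decreasing_by
  · simp only [List.length_drop, List.length_cons]
    have : 1 ≤ k.length := List.length_pos_iff.mpr h.1
    omega
  · simp

-- fuel-free specification of str.split scan (k nonempty)
def pvSplit (k : List Char) : List Char → List (List Char)
  | [] => [[]]
  | c :: t =>
    if h : k ≠ [] ∧ k.isPrefixOf (c :: t) then [] :: pvSplit k ((c :: t).drop k.length)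
    else
      match pvSplit k t with
      | [] => [[c]]
      | p :: r => (c :: p) :: r
termination_by l => l.length
decreasing_by
  · simp only [List.length_drop, List.length_cons]
    have : 1 ≤ k.length := List.length_pos_iff.mpr h.1
    omega
  · simp

lemma replace_go_eq_rep (k v : List Char) (hk : k ≠ []) :
    ∀ (fuel : Nat) (l acc : List Char), l.length ≤ fuel →
      PySem.Chars.replace.go k v fuel l acc = acc.reverse ++ pvRep k v l := by
  intro fuel
  induction fuel with
  | zero =>
    intro l acc h
    have hl : l = [] := List.length_eq_zero_iff.mp (Nat.le_zero.mp h)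
    subst hl
    simp [PySem.Chars.replace.go, pvRep]
  | succ n ih =>
    intro l acc h
    match l with
    | [] => simp [PySem.Chars.replace.go, pvRep]
    | c :: t =>
      rw [PySem.Chars.replace.go]
      by_cases hp : k.isPrefixOf (c :: t)
      · have hlen : 1 ≤ k.length := List.length_pos_iff.mpr hk
        have hdlen : ((c :: t).drop k.length).length ≤ n := by
          have := (List.isPrefixOf_iff_prefix.mp hp).length_le
          simp only [List.length_drop, List.length_cons] at *
          omega
        simp only [hp, if_pos]
        rw [ih _ _ hdlen]
        rw [pvRep]
        simp [hk, hp]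
      · simp only [hp, if_neg, Bool.false_eq_true, not_false_iff]
        rw [ih t (c :: acc) (by simpa using Nat.le_of_succ_le_succ h)]
        rw [pvRep]
        simp [hk, hp]

lemma replace_eq_rep (s k v : List Char) (hk : k ≠ []) :
    PySem.Chars.replace s k v = pvRep k v s := by
  rw [PySem.Chars.replace]
  simp [List.isEmpty_iff, hk, replace_go_eq_rep k v hk s.length s [] (le_refl _)]

lemma pvSplit_ne_nil (k l : List Char) : pvSplit k l ≠ [] := by
  match l with
  | [] => simp [pvSplit]
  | c :: t =>
    rw [pvSplit]
    split
    · simp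
    · split <;> simp

def pvConsHead (p : List Char) : List (List Char) → List (List Char)
  | [] => [p]
  | h :: r => (p ++ h) :: r

lemma splitOn_go_eq_split (k : List Char) (hk : k ≠ []) :
    ∀ (fuel : Nat) (l cur : List Char) (acc : List (List Char)), l.length < fuel →
      PySem.Chars.splitOn.go k fuel l cur acc
        = acc.reverse ++ pvConsHead cur.reverse (pvSplit k l) := by
  intro fuel
  induction fuel with
  | zero => intro l cur acc h; omega
  | succ n ih =>
    intro l cur acc h
    match l with
    | [] => simp [PySem.Chars.splitOn.go, pvSplit, pvConsHead]
    | c :: t =>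
      rw [PySem.Chars.splitOn.go]
      by_cases hp : k.isPrefixOf (c :: t)
      · have hlen : 1 ≤ k.length := List.length_pos_iff.mpr hk
        have hdlen : ((c :: t).drop k.length).length < n := by
          have := (List.isPrefixOf_iff_prefix.mp hp).length_le
          simp only [List.length_drop, List.length_cons] at *
          omega
        simp only [hp, if_pos]
        rw [ih _ _ _ hdlen]
        rw [pvSplit]
        simp only [hk, ne_eq, not_false_iff, true_and, hp, dite_true, pvConsHead,
          List.reverse_nil, List.nil_append]
        cases hs : pvSplit k ((c :: t).drop k.length) with
        | nil => exact absurd hs (pvSplit_ne_nil _ _)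
        | cons p r => simp
      · simp only [hp, if_neg, Bool.false_eq_true, not_false_iff]
        rw [ih t (c :: cur) acc (by simp at h ⊢; omega)]
        rw [pvSplit]
        simp only [hk, ne_eq, not_false_iff, true_and, hp, dite_false, Bool.false_eq_true]
        cases hs : pvSplit k t with
        | nil => exact absurd hs (pvSplit_ne_nil k t)
        | cons p r => simp [pvConsHead]

lemma splitOn_eq_split (s k : List Char) (hk : k ≠ []) :
    PySem.Chars.splitOn s k = pvSplit k s := by
  rw [PySem.Chars.splitOn]
  rw [splitOn_go_eq_split k hk (s.length + 1) s [] [] (by omega)]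
  simp [pvConsHead]
  cases hs : pvSplit k s with
  | nil => exact absurd hs (pvSplit_ne_nil k s)
  | cons p r => simp [pvConsHead]

lemma intercalate_split (k v : List Char) (hk : k ≠ []) :
    ∀ l, List.intercalate v (pvSplit k l) = pvRep k v l := by
  intro l
  induction hn : l.length using Nat.strong_induction_on generalizing l with
  | _ n ihn =>
  subst hn
  match l with
  | [] => simp [pvSplit, pvRep, List.intercalate]
  | c :: t =>
    rw [pvSplit, pvRep]
    by_cases hp : k.isPrefixOf (c :: t)
    · have hlen : 1 ≤ k.length := List.length_pos_iff.mpr hk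
      simp only [hk, ne_eq, not_false_iff, true_and, hp, dite_true]
      have hdlen : ((c :: t).drop k.length).length < (c :: t).length := by
        have := (List.isPrefixOf_iff_prefix.mp hp).length_le
        simp only [List.length_drop, List.length_cons] at *
        omega
      rw [← ihn _ hdlen _ rfl]
      cases hs : pvSplit k ((c :: t).drop k.length) with
      | nil => exact absurd hs (pvSplit_ne_nil _ _)
      | cons p r => simp [List.intercalate]
    · simp only [hk, ne_eq, not_false_iff, true_and, hp, dite_false]
      rw [← ihn t.length (by simp) t rfl]
      cases hs : pvSplit k t with
      | nil => exact absurd hs (pvSplit_ne_nil _ _)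
      | cons p r =>
        cases r with
        | nil => simp [List.intercalate]
        | cons p2 r2 => simp [List.intercalate]

lemma not_prefix_of_head_notMem (k : List Char) (c : Char) (r : List Char)
    (hk : k ≠ []) (hc : c ∉ k) : ¬ k.isPrefixOf (c :: r) = true := by
  intro hp
  match k with
  | [] => exact hk rfl
  | a :: k' =>
    obtain ⟨tl, htl⟩ := List.isPrefixOf_iff_prefix.mp hp
    have ha : a = c := by
      have := congrArg List.head? htl
      simpa using this
    exact hc (ha ▸ List.mem_cons_self)

lemma rep_dead_prefix (k v d t : List Char) (hk : k ≠ []) (hd : ∀ c ∈ d, c ∉ k) :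
    pvRep k v (d ++ t) = d ++ pvRep k v t := by
  induction d with
  | nil => simp
  | cons c d' ih =>
    rw [List.cons_append, pvRep]
    have hc : c ∉ k := hd c List.mem_cons_self
    simp only [not_prefix_of_head_notMem k c _ hk hc, and_false, dite_false]
    rw [ih (fun x hx => hd x (List.mem_cons_of_mem _ hx))]
    simp

lemma rep_append (k v s t : List Char) (hk : k ≠ [])
    (ht : ∀ c, t.head? = some c → c ∉ k) :
    pvRep k v (s ++ t) = pvRep k v s ++ pvRep k v t := by
  induction hn : s.length using Nat.strong_induction_on generalizing s with
  | _ n ihn =>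
  subst hn
  match s with
  | [] => simp [pvRep]
  | c :: s' =>
    by_cases hp : k.isPrefixOf ((c :: s') ++ t)
    · by_cases hlen : k.length ≤ (c :: s').length
      · have hps : k.isPrefixOf (c :: s') := by
          apply List.isPrefixOf_iff_prefix.mpr
          exact List.prefix_of_prefix_length_le (List.isPrefixOf_iff_prefix.mp hp)
            (List.prefix_append _ _) hlen
        have hdrop : ((c :: s') ++ t).drop k.length = (c :: s').drop k.length ++ t :=
          List.drop_append_of_le_length hlen
        have h1 : 1 ≤ k.length := List.length_pos_iff.mpr hk
        have hlt : ((c :: s').drop k.length).length < (c :: s').length := by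
          simp only [List.length_drop, List.length_cons]; omega
        rw [show (c :: s') ++ t = c :: (s' ++ t) from rfl] at hdrop hp ⊢
        rw [pvRep]
        simp only [hk, ne_eq, not_false_iff, true_and, hp, dite_true]
        rw [hdrop]
        rw [ihn _ hlt _ rfl]
        conv_rhs => rw [pvRep]
        simp only [hk, ne_eq, not_false_iff, true_and, hps, dite_true]
        simp [List.append_assoc]
      · exfalso
        obtain ⟨r, hr⟩ := List.isPrefixOf_iff_prefix.mp hp
        have hm : (c :: s').length < k.length := by omega
        set m := (c :: s').length with hmdef
        have hlt2 : m < ((c :: s') ++ t).length := by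
          have := congrArg List.length hr
          simp only [List.length_append] at this
          simp only [List.length_append]
          omega
        have e1 : ((c :: s') ++ t)[m]? = t[0]? := by
          rw [List.getElem?_append_right (by omega)]
          simp [hmdef]
        have e2 : ((c :: s') ++ t)[m]? = k[m]? := by
          rw [← hr, List.getElem?_append_left hm]
        have e3 : k[m]? = some k[m] := List.getElem?_eq_getElem hm
        have e4 : t.head? = some k[m] := by
          rw [List.head?_eq_getElem?, ← e1, e2, e3]
        exact ht _ e4 (List.getElem_mem hm)
    · have hps : ¬ k.isPrefixOf (c :: s') = true := by
        intro hps
        exact hp (List.isPrefixOf_iff_prefix.mpr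
          ((List.isPrefixOf_iff_prefix.mp hps).trans (List.prefix_append _ _)))
      rw [show (c :: s') ++ t = c :: (s' ++ t) from rfl] at hp ⊢
      rw [pvRep]
      simp only [hp, and_false, dite_false]
      conv_rhs => rw [pvRep]
      simp only [hps, and_false, dite_false]
      rw [ihn s'.length (by simp) s' rfl]
      simp

def pvRender (segs : List (Bool × List Char)) : List Char := segs.flatMap (fun s => s.2)

-- no two adjacent live segments
def pvSep (segs : List (Bool × List Char)) : Prop :=
  List.IsChain (fun a b => a.1 = false ∨ b.1 = false) segs

-- all dead segments are nonempty and avoid the characters of k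
def pvDeadOK (k : List Char) (segs : List (Bool × List Char)) : Prop :=
  ∀ s ∈ segs, s.1 = false → s.2 ≠ [] ∧ ∀ c ∈ s.2, c ∉ k

lemma render_interleave (v : List Char) (parts : List (List Char)) (h : parts ≠ []) :
    pvRender (pvInterleave v parts) = List.intercalate v parts := by
  match parts with
  | [] => exact absurd rfl h
  | p :: rest =>
    induction rest generalizing p with
    | nil => simp [pvInterleave, pvRender, List.intercalate]
    | cons q r ih =>
      have := ih q (by simp)
      simp only [pvInterleave, pvRender] at this ⊢
      simp only [List.flatMap_cons, List.flatMap_append] at this ⊢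
      rw [show List.intercalate v (p :: q :: r) = p ++ v ++ List.intercalate v (q :: r) by
        simp [List.intercalate, List.intersperse]]
      simp only [← this]
      simp


lemma render_split (k v s : List Char) (hk : k ≠ []) :
    pvRender (pvInterleave v (PySem.Chars.splitOn s k)) = pvRep k v s := by
  rw [splitOn_eq_split s k hk,
    render_interleave v _ (pvSplit_ne_nil k s),
    intercalate_split k v hk s]

lemma step_render (k v : List Char) (segs : List (Bool × List Char)) (hk : k ≠ [])
    (hsep : pvSep segs) (hdead : pvDeadOK k segs) :
    pvRep k v (pvRender segs) = pvRender (pvSegStep k v segs) := by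
  induction segs with
  | nil => simp [pvRender, pvSegStep, pvRep]
  | cons sg rest ih =>
    have hsep' : pvSep rest := hsep.tail
    have hdead' : pvDeadOK k rest := fun s hs => hdead s (List.mem_cons_of_mem _ hs)
    obtain ⟨b, s⟩ := sg
    cases b with
    | false =>
      obtain ⟨hne, hch⟩ := hdead (false, s) List.mem_cons_self rfl
      have : pvRender ((false, s) :: rest) = s ++ pvRender rest := by simp [pvRender]
      rw [this, rep_dead_prefix k v s _ hk hch, ih hsep' hdead']
      simp [pvSegStep, pvRender]
    | true =>
      have hren : pvRender ((true, s) :: rest) = s ++ pvRender rest := by simp [pvRender]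
      have hhd : ∀ c, (pvRender rest).head? = some c → c ∉ k := by
        intro c hc
        match rest, hc with
        | (b2, d) :: rest2, hc =>
          have hb2 : b2 = false := by
            have := (List.isChain_cons_cons.mp hsep).1
            simpa using this
          obtain ⟨hne, hch⟩ := hdead (b2, d) (List.mem_cons_of_mem _ List.mem_cons_self) hb2
          apply hch
          match d, hne with
          | d0 :: d', _ =>
            simp only [pvRender, List.flatMap_cons, List.cons_append, List.head?_cons,
              Option.some.injEq] at hc
            exact hc ▸ List.mem_cons_self
      rw [hren, rep_append k v s _ hk hhd, ih hsep' hdead']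
      have e1 : pvSegStep k v ((true, s) :: rest)
          = pvInterleave v (PySem.Chars.splitOn s k) ++ pvSegStep k v rest := by
        simp [pvSegStep]
      have e2 : pvRender (pvInterleave v (PySem.Chars.splitOn s k) ++ pvSegStep k v rest)
          = pvRender (pvInterleave v (PySem.Chars.splitOn s k)) ++ pvRender (pvSegStep k v rest) := by
        simp [pvRender]
      rw [e1, e2, render_split k v s hk]

lemma interleave_sep (v : List Char) (parts : List (List Char)) :
    pvSep (pvInterleave v parts) := by
  match parts with
  | [] => simp [pvInterleave, pvSep]
  | p :: rest =>
    induction rest generalizing p with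
    | nil => simp [pvInterleave, pvSep]
    | cons q r ih =>
      have := ih q
      simp only [pvInterleave, pvSep, List.flatMap_cons] at this ⊢
      simp only [List.cons_append]
      rw [List.isChain_cons_cons]
      refine ⟨Or.inr rfl, ?_⟩
      rw [List.isChain_cons_cons]
      exact ⟨Or.inl rfl, this⟩

lemma sep_step (k v : List Char) (segs : List (Bool × List Char)) (hsep : pvSep segs) :
    pvSep (pvSegStep k v segs) := by
  induction segs with
  | nil => simp [pvSegStep, pvSep]
  | cons sg rest ih =>
    have hsep' : pvSep rest := hsep.tail
    have hrest := ih hsep'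
    obtain ⟨b, s⟩ := sg
    simp only [pvSegStep, List.flatMap_cons] at *
    rw [pvSep, List.isChain_append]
    refine ⟨?_, hrest, ?_⟩
    · cases b with
      | false => simp [pvSep]
      | true => simpa using interleave_sep v (PySem.Chars.splitOn s k)
    · -- boundary: either the left block ends dead, or the right block starts dead
      intro x hx y hy
      cases b with
      | false =>
        simp at hx
        exact Or.inl (hx ▸ rfl)
      | true =>
        -- rest must start with a dead segment (pvSep) or be empty
        right
        match rest, hy with
        | (b2, d) :: rest2, hy =>
          have hb2 : b2 = false := by
            have := (List.isChain_cons_cons.mp hsep).1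
            simpa using this
          subst hb2
          simp only [List.flatMap_cons, if_neg, Bool.false_eq_true, not_false_iff] at hy
          simp only [List.cons_append, List.head?_cons, Option.mem_def, Option.some.injEq] at hy
          exact hy ▸ rfl

lemma deadOK_step (k v k' : List Char) (segs : List (Bool × List Char))
    (hdead : pvDeadOK k' segs) (hv : v ≠ [] ∧ ∀ c ∈ v, c ∉ k') :
    pvDeadOK k' (pvSegStep k v segs) := by
  intro s hs hfalse
  simp only [pvSegStep] at hs
  rcases List.mem_flatMap.mp hs with ⟨sg, hsg, hmem⟩
  by_cases hb : sg.1 = true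
  · rw [if_pos hb] at hmem
    have hcase : s = (false, v) ∨ s.1 = true := by
      cases hsp : PySem.Chars.splitOn sg.2 k with
      | nil => rw [hsp] at hmem; simp [pvInterleave] at hmem
      | cons p parts =>
        rw [hsp] at hmem
        simp only [pvInterleave, List.mem_cons, List.mem_flatMap] at hmem
        rcases hmem with h | ⟨q, hq, hm⟩
        · exact Or.inr (by rw [h])
        · simp only [List.mem_cons, List.not_mem_nil, or_false] at hm
          rcases hm with h | h
          · exact Or.inl h
          · exact Or.inr (by rw [h])
    rcases hcase with h | h
    · subst h; exact ⟨hv.1, hv.2⟩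
    · simp [h] at hfalse
  · rw [if_neg hb] at hmem
    simp only [List.mem_singleton] at hmem
    subst hmem
    exact hdead s hsg (by simpa using hb)

lemma fold_render (pairs : List (List Char × List Char)) (segs : List (Bool × List Char))
    (hk : ∀ p ∈ pairs, p.1 ≠ [])
    (hord : List.Pairwise (fun p q => ∀ c ∈ p.2, c ∉ q.1) pairs)
    (hvals : ∀ p ∈ pairs.dropLast, p.2 ≠ [])
    (hsep : pvSep segs)
    (hdead : ∀ p ∈ pairs, pvDeadOK p.1 segs) :
    List.foldl (fun t p => pvRep p.1 p.2 t) (pvRender segs) pairs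
      = pvRender (List.foldl (fun sg p => pvSegStep p.1 p.2 sg) segs pairs) := by
  induction pairs generalizing segs with
  | nil => simp
  | cons p rest ih =>
    simp only [List.foldl_cons]
    rw [step_render p.1 p.2 segs (hk p List.mem_cons_self) hsep (hdead p List.mem_cons_self)]
    apply ih
    · intro q hq; exact hk q (List.mem_cons_of_mem _ hq)
    · exact List.Pairwise.of_cons hord
    · intro q hq
      apply hvals
      cases rest with
      | nil => simp at hq
      | cons a b =>
        rw [List.dropLast_cons₂]
        exact List.mem_cons_of_mem _ hq
    · exact sep_step _ _ _ hsep
    · intro q hq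
      apply deadOK_step
      · exact hdead q (List.mem_cons_of_mem _ hq)
      · refine ⟨?_, ?_⟩
        · apply hvals
          cases rest with
          | nil => simp at hq
          | cons a b => rw [List.dropLast_cons₂]; exact List.mem_cons_self
        · exact (List.pairwise_cons.mp hord).1 q hq

lemma foldA_toList (pairs : List (String × String)) (t : String)
    (hk : ∀ p ∈ pairs, p.1.toList ≠ []) :
    (List.foldl (fun t (kv : String × String) => PySem.Str.replace t kv.1 kv.2) t pairs).toList
      = List.foldl (fun l p => pvRep p.1 p.2 l) t.toList
          (pairs.map (fun p => (p.1.toList, p.2.toList))) := by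
  induction pairs generalizing t with
  | nil => simp
  | cons p rest ih =>
    simp only [List.foldl_cons, List.map_cons]
    rw [ih (PySem.Str.replace t p.1 p.2) (fun q hq => hk q (List.mem_cons_of_mem _ hq))]
    congr 1
    rw [PySem.Str.toList_replace, replace_eq_rep _ _ _ (hk p List.mem_cons_self)]

-- ===== VERDICT (by name: the statement is the Claim_ definition above) =====
set_option maxHeartbeats 1000000 in
set_option maxRecDepth 8192 in
theorem restaurar_placeholders_py_spec : Claim_equal_restaurar_placeholders_py := by
  intro texto_traducido placeholders _
  unfold Spec_restaurar_placeholders_py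
  apply String.toList_inj.mp
  simp only [restaurar_placeholders_py, restaurar_placeholders_py_alt, String.toList_ofList]
  rw [foldA_toList _ _ ?hknil]
  case hknil =>
    intro p hp
    simp only [List.mem_cons, List.not_mem_nil, or_false] at hp
    rcases hp with rfl|rfl|rfl|rfl|rfl|rfl|rfl|rfl|rfl|rfl|rfl|rfl|rfl|rfl
    all_goals try decide
    exact (by decide : ("ELEMENTO" : String).toList ≠ [])
  simp only [List.map_cons, List.map_nil]
  have h0 : pvRender [(true, texto_traducido.toList)] = texto_traducido.toList := by
    simp [pvRender]
  conv_lhs => rw [← h0]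
  apply fold_render
  · intro p hp
    simp only [List.mem_cons, List.not_mem_nil, or_false] at hp
    rcases hp with rfl|rfl|rfl|rfl|rfl|rfl|rfl|rfl|rfl|rfl|rfl|rfl|rfl|rfl
    all_goals try decide
    exact (by decide : ("ELEMENTO" : String).toList ≠ [])
  · refine (List.pairwise_append (l₁ := [("PRIMER_ELEMENTO".toList, "{0}".toList), ("SEGUNDO_ELEMENTO".toList, "{1}".toList), ("TERCER_ELEMENTO".toList, "{2}".toList), ("CUARTO_ELEMENTO".toList, "{3}".toList), ("NOMBRE".toList, "{name}".toList), ("PERSONAJE".toList, "{pawn}".toList), ("OBJETO".toList, "{item}".toList), ("NUMERO".toList, "{number}".toList), ("CANTIDAD".toList, "{amount}".toList), ("GENERO".toList, "{gender}".toList), ("FACCIÓN".toList, "{faction}".toList), ("UBICACIÓN".toList, "{location}".toList), ("TIEMPO".toList, "{time}".toList)])).mpr ⟨by simp [List.pairwise_cons], by simp, ?_⟩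
    intro a ha b hb
    simp only [List.mem_singleton] at hb
    subst hb
    show ∀ c ∈ a.2, c ∉ "ELEMENTO".toList
    exact (by simp : ∀ x ∈ [("PRIMER_ELEMENTO".toList, "{0}".toList), ("SEGUNDO_ELEMENTO".toList, "{1}".toList), ("TERCER_ELEMENTO".toList, "{2}".toList), ("CUARTO_ELEMENTO".toList, "{3}".toList), ("NOMBRE".toList, "{name}".toList), ("PERSONAJE".toList, "{pawn}".toList), ("OBJETO".toList, "{item}".toList), ("NUMERO".toList, "{number}".toList), ("CANTIDAD".toList, "{amount}".toList), ("GENERO".toList, "{gender}".toList), ("FACCIÓN".toList, "{faction}".toList), ("UBICACIÓN".toList, "{location}".toList), ("TIEMPO".toList, "{time}".toList)], ∀ c ∈ x.2, c ∉ "ELEMENTO".toList) a ha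
  · show ∀ p ∈ [("PRIMER_ELEMENTO".toList, "{0}".toList), ("SEGUNDO_ELEMENTO".toList, "{1}".toList), ("TERCER_ELEMENTO".toList, "{2}".toList), ("CUARTO_ELEMENTO".toList, "{3}".toList), ("NOMBRE".toList, "{name}".toList), ("PERSONAJE".toList, "{pawn}".toList), ("OBJETO".toList, "{item}".toList), ("NUMERO".toList, "{number}".toList), ("CANTIDAD".toList, "{amount}".toList), ("GENERO".toList, "{gender}".toList), ("FACCIÓN".toList, "{faction}".toList), ("UBICACIÓN".toList, "{location}".toList), ("TIEMPO".toList, "{time}".toList)], p.2 ≠ []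
    simp
  · simp [pvSep]
  · intro p hp q hq hf
    simp only [List.mem_singleton] at hq
    subst hq
    simp at hf
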